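-- pv_equiv track=rewrite | github.com/PDXCODEGUILD-Somerfield-Projects/PythonCrashCourse | pig-latin.py | count_first_consonants
-- ===== SOURCE A (Python) =====
-- def count_first_consonants(word):
--     """Counts the number of consonants at the beginning of a word
--
--     Returns the number of consonants
--     ** if there are no vowels in the word, it returns 0
--
--     :param word:
--     :return:
--
--     >>> count_first_consonants('string')
--     3
--
--     >>> count_first_consonants('celery')
--     1
--
--     >>> count_first_consonants('grrr')
--     0
--
--     """
--     vowel_locations = []
--     # creates a list of vowel locations in the word
--     for c in vowel_list:
--         if c in word:
--             vowel_locations.append(word.find(c))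
--     # determines the location of the first vowel (lowest location)
--     if vowel_locations:
--         num_consonant_string = min(vowel_locations)
--     # if there are no vowels, returns 0
--     else:
--         num_consonant_string = 0
--     return num_consonant_string
--
-- vowel_list = 'a', 'e', 'i', 'o', 'u'
-- ===== SOURCE B (Python) =====
-- def count_first_consonants(word):
--     """Counts the number of consonants at the beginning of a word.
--
--     Single left-to-right scan: return the index of the first vowel,
--     or 0 if the word contains no vowel.
--     """
--     vowels = {'a', 'e', 'i', 'o', 'u'}
--     for i, ch in enumerate(word):
--         if ch in vowels:
--             return i
--     return 0
-- ===== Notes on version B (the rewrite author's own statement) =====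
-- stated objective: idiomatic
-- what changed: Replaced the five per-vowel word.find scans plus min() with a single left-to-right character scan that returns the index of the first vowel (0 if none).
import Mathlib
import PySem

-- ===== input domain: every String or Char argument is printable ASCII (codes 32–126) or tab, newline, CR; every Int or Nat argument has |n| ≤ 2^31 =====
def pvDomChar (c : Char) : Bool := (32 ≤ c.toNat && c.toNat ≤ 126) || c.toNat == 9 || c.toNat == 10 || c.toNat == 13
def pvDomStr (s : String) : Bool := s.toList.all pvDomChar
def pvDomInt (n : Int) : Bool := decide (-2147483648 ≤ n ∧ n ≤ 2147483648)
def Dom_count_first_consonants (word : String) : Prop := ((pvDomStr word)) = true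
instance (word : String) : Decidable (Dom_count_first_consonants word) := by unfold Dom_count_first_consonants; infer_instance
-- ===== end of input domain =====

-- B replaces A's five per-vowel word.find scans + min() with one left-to-right scan returning the index of the first vowel (0 if none); objective: idiomatic.

-- ===== PORT A =====
def vowel_list : List String := ["a", "e", "i", "o", "u"]

def count_first_consonants (word : String) : Int :=
  let vowel_locations :=
    vowel_list.foldl
      (fun acc c => if PySem.Str.isIn c word then acc ++ [PySem.Str.find word c] else acc) []
  match PySem.List.min? vowel_locations (fun x => x) with
  | some m => m
  | none => 0

-- ===== PORT B =====
def pvVowels : List Char := ['a', 'e', 'i', 'o', 'u']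

-- the 'for i, ch in enumerate(word): if ch in vowels: return i' loop
def pvScan : List Char → Int → Int
  | [], _ => 0
  | c :: rest, i => if pvVowels.contains c then i else pvScan rest (i + 1)

def count_first_consonants_alt (word : String) : Int :=
  pvScan word.toList 0

-- ===== PRECONDITION & SPEC =====
def Spec_count_first_consonants (word : String) (out : Int) : Prop := out = count_first_consonants_alt word
instance (word : String) (out : Int) : Decidable (Spec_count_first_consonants word out) := by unfold Spec_count_first_consonants; infer_instance

-- ===== CLAIM (what is proved, stated in full; the proofs are below) =====
def Claim_equal_count_first_consonants : Prop := ∀ (word : String), Dom_count_first_consonants word → Spec_count_first_consonants word (count_first_consonants word)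

-- ===== LEMMAS AND PROOFS =====

theorem singleton_infix_iff_mem {c : Char} {l : List Char} : [c] <:+: l ↔ c ∈ l := by
  constructor
  · rintro ⟨s, t, rfl⟩; simp
  · intro h
    obtain ⟨pre, suf, rfl⟩ := List.append_of_mem h
    exact ⟨pre, suf, by simp⟩

theorem singleton_prefix_drop {c : Char} {l : List Char} {i : Nat} :
    [c] <+: l.drop i ↔ l[i]? = some c := by
  rw [← List.head?_drop]
  cases l.drop i with
  | nil => simp
  | cons x r => simp [List.cons_prefix_cons, eq_comm]

theorem find_single (l : List Char) (c : Char) :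
    PySem.Chars.find l [c] = match PySem.List.index? l c with
      | some k => (k : Int) | none => -1 := by
  cases h : PySem.List.index? l c with
  | none =>
    have hnm : c ∉ l := (PySem.List.index?_eq_none_iff l c).mp h
    have : ¬ [c] <:+: l := fun hin => hnm (singleton_infix_iff_mem.mp hin)
    simpa using (PySem.Chars.find_eq_neg_one_iff l [c]).mpr this
  | some k =>
    obtain ⟨hk, hget, hmin⟩ := PySem.List.getElem_of_index?_eq_some h
    have hmem : c ∈ l := by exact hget ▸ List.getElem_mem hk
    have hpos : 0 ≤ PySem.Chars.find l [c] :=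
      (PySem.Chars.find_nonneg_iff l [c]).mpr (singleton_infix_iff_mem.mpr hmem)
    obtain ⟨hpre, hfirst⟩ := PySem.Chars.find_spec hpos
    set t := (PySem.Chars.find l [c]).toNat with ht
    have hgt : l[t]? = some c := singleton_prefix_drop.mp hpre
    have htlt : t < l.length := (List.getElem?_eq_some_iff.mp hgt).1
    -- t = k: both are the first occurrence of c
    have htk : t = k := by
      rcases lt_trichotomy t k with h1 | h1 | h1
      · exact absurd ((List.getElem?_eq_some_iff.mp hgt).2) (by simpa using hmin t h1)
      · exact h1
      · exact absurd (singleton_prefix_drop.mpr (by simp [hget, hk])) (hfirst k h1)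
    have hcast : ((PySem.Chars.find l [c]).toNat : Int) = PySem.Chars.find l [c] :=
      Int.toNat_of_nonneg hpos
    show PySem.Chars.find l [c] = (k : Int)
    rw [← htk, ht]
    exact hcast.symm

-- locs as filter+map
theorem locs_eq (word : String) :
    vowel_list.foldl
      (fun acc c => if PySem.Str.isIn c word then acc ++ [PySem.Str.find word c] else acc) []
    = ((vowel_list.filter (fun c => PySem.Str.isIn c word)).map (fun c => PySem.Str.find word c)) := by
  rw [PySem.List.foldl_append_if (fun c => PySem.Str.isIn c word) (fun c => PySem.Str.find word c) vowel_list []]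
  simp

theorem vowel_str_of_char {c : Char} (hc : c ∈ pvVowels) :
    ∃ s ∈ vowel_list, s.toList = [c] := by
  simp only [pvVowels, List.mem_cons, List.not_mem_nil, or_false] at hc
  rcases hc with rfl | rfl | rfl | rfl | rfl
  · exact ⟨"a", by simp [vowel_list], rfl⟩
  · exact ⟨"e", by simp [vowel_list], rfl⟩
  · exact ⟨"i", by simp [vowel_list], rfl⟩
  · exact ⟨"o", by simp [vowel_list], rfl⟩
  · exact ⟨"u", by simp [vowel_list], rfl⟩

theorem vowel_char_of_str {s : String} (hs : s ∈ vowel_list) :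
    ∃ c ∈ pvVowels, s.toList = [c] := by
  simp only [vowel_list, List.mem_cons, List.not_mem_nil, or_false] at hs
  rcases hs with rfl | rfl | rfl | rfl | rfl
  · exact ⟨'a', by simp [pvVowels], rfl⟩
  · exact ⟨'e', by simp [pvVowels], rfl⟩
  · exact ⟨'i', by simp [pvVowels], rfl⟩
  · exact ⟨'o', by simp [pvVowels], rfl⟩
  · exact ⟨'u', by simp [pvVowels], rfl⟩

-- B's loop in terms of findIdx?
theorem pvScan_eq (l : List Char) (i : Int) :
    pvScan l i = match l.findIdx? (fun c => pvVowels.contains c) with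
      | some j => i + (j : Int) | none => 0 := by
  induction l generalizing i with
  | nil => simp [pvScan]
  | cons c rest ih =>
    rw [pvScan, List.findIdx?_cons]
    by_cases h : pvVowels.contains c = true
    · simp only [List.contains_eq_mem, decide_eq_true_eq] at h
      simp [h]
    · rw [if_neg (by simpa using h), if_neg (by simpa using h), ih]
      cases rest.findIdx? (fun c => pvVowels.contains c) <;> simp <;> ring

theorem count_first_consonants_eq (word : String) :
    count_first_consonants word = count_first_consonants_alt word := by
  unfold count_first_consonants count_first_consonants_alt
  rw [locs_eq, pvScan_eq]
  set l := word.toList with hl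
  cases hf : l.findIdx? (fun c => pvVowels.contains c) with
  | none =>
    -- no vowel character occurs in l: the filter is empty
    have hnone : ∀ c ∈ pvVowels, c ∉ l := by
      intro c hc hmem
      have := List.findIdx?_eq_none_iff.mp hf c hmem
      simp [List.contains_eq_mem] at this
      exact this hc
    have hfilter : vowel_list.filter (fun c => PySem.Str.isIn c word) = [] := by
      rw [List.filter_eq_nil_iff]
      intro s hs
      obtain ⟨c, hc, hcl⟩ := vowel_char_of_str hs
      simp only [PySem.Str.isIn_eq, hcl, ← hl, Bool.not_eq_true]
      rw [← Bool.not_eq_true, PySem.Chars.isIn_iff_infix, singleton_infix_iff_mem]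
      exact hnone c hc
    rw [hfilter]
    simp [PySem.List.min?]
  | some j =>
    obtain ⟨hjlt, hpj, hmin⟩ := List.findIdx?_eq_some_iff_getElem.mp hf
    have hjv : l[j] ∈ pvVowels := by simpa [List.contains_eq_mem] using hpj
    -- every element of locs is the first index of some vowel, hence ≥ j
    have hub : ∀ x ∈ ((vowel_list.filter (fun c => PySem.Str.isIn c word)).map
        (fun c => PySem.Str.find word c)), (j : Int) ≤ x := by
      intro x hx
      obtain ⟨s, hs, rfl⟩ := List.mem_map.mp hx
      have hsin := (List.mem_filter.mp hs)
      obtain ⟨c, hc, hcl⟩ := vowel_char_of_str hsin.1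
      have hmem : c ∈ l := by
        have := hsin.2
        simp only [PySem.Str.isIn_eq, hcl, ← hl] at this
        exact singleton_infix_iff_mem.mp ((PySem.Chars.isIn_iff_infix _ _).mp this)
      rw [PySem.Str.find_eq, hcl, ← hl, find_single]
      cases hidx : PySem.List.index? l c with
      | none => exact absurd hmem ((PySem.List.index?_eq_none_iff l c).mp hidx)
      | some k =>
        obtain ⟨hk, hget, _⟩ := PySem.List.getElem_of_index?_eq_some hidx
        have : ¬ k < j := fun hkj => by
          have := hmin k (by omega)
          rw [hget] at this
          simp [List.contains_eq_mem, hc] at this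
        show (j : Int) ≤ (k : Int)
        omega
    -- the vowel l[j] itself contributes the value j
    have hjmem : (j : Int) ∈ ((vowel_list.filter (fun c => PySem.Str.isIn c word)).map
        (fun c => PySem.Str.find word c)) := by
      obtain ⟨s, hs, hsl⟩ := vowel_str_of_char hjv
      refine List.mem_map.mpr ⟨s, List.mem_filter.mpr ⟨hs, ?_⟩, ?_⟩
      · rw [PySem.Str.isIn_eq, hsl, ← hl, PySem.Chars.isIn_iff_infix, singleton_infix_iff_mem]
        · exact List.getElem_mem hjlt
      · rw [PySem.Str.find_eq, hsl, ← hl, find_single]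
        have hidx : PySem.List.index? l l[j] = some j := by
          rw [PySem.List.index?_eq_some_iff]
          refine ⟨l.take j, l.drop (j+1), ?_, by simp [List.length_take]; omega, ?_⟩
          · rw [List.getElem_cons_drop hjlt, List.take_append_drop]
          · intro hmem
            obtain ⟨i, hi, hgi⟩ := List.mem_iff_getElem.mp hmem
            have hij : i < j := by have := List.length_take_le j l; omega
            have := hmin i hij
            rw [List.getElem_take] at hgi
            rw [hgi] at this
            simp [List.contains_eq_mem, hjv] at this
        rw [hidx]
    show (match PySem.List.min? ((vowel_list.filter (fun c => PySem.Str.isIn c word)).map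
        (fun c => PySem.Str.find word c)) (fun x => x) with
      | some m => m | none => 0) = 0 + (j : Int)
    cases hm : PySem.List.min? ((vowel_list.filter (fun c => PySem.Str.isIn c word)).map
        (fun c => PySem.Str.find word c)) (fun x => x) with
    | none =>
      rw [PySem.List.min?_eq_none_iff] at hm
      rw [hm] at hjmem
      simp at hjmem
    | some m =>
      have h1 := PySem.List.min?_isMin hm _ hjmem
      have h2 := hub m (PySem.List.min?_mem hm)
      simp only [] at h1
      show m = 0 + (j : Int)
      omega

-- ===== VERDICT (by name: the statement is the Claim_ definition above) =====
theorem count_first_consonants_spec : Claim_equal_count_first_consonants := by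
  intro word _
  unfold Spec_count_first_consonants
  exact count_first_consonants_eq word
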